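-- pv_equiv track=rewrite | github.com/nvsudo/masii | matchmaker/jodi/matching.py | _same_metro_area
-- ===== SOURCE A (Python) =====
-- def _same_metro_area(loc_a: str, loc_b: str) -> bool:
--     """Check if two locations are in the same metro area"""
--     metro_areas = {
--         'sydney': ['sydney', 'parramatta', 'bondi', 'manly'],
--         'melbourne': ['melbourne', 'carlton', 'richmond', 'st kilda'],
--         'brisbane': ['brisbane', 'gold coast', 'sunshine coast'],
--         'delhi': ['delhi', 'new delhi', 'gurgaon', 'noida', 'ghaziabad'],
--         'mumbai': ['mumbai', 'navi mumbai', 'thane'],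
--     }
--
--     for metro, suburbs in metro_areas.items():
--         if any(s in loc_a for s in suburbs) and any(s in loc_b for s in suburbs):
--             return True
--
--     return False
-- ===== SOURCE B (Python) =====
-- def _same_metro_area(loc_a: str, loc_b: str) -> bool:
--     """Check if two locations are in the same metro area"""
--     # inverted index: suburb -> metro label, one flat table instead of grouped lists
--     suburb_metro = [
--         ('sydney', 'sydney'), ('parramatta', 'sydney'), ('bondi', 'sydney'), ('manly', 'sydney'),
--         ('melbourne', 'melbourne'), ('carlton', 'melbourne'), ('richmond', 'melbourne'), ('st kilda', 'melbourne'),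
--         ('brisbane', 'brisbane'), ('gold coast', 'brisbane'), ('sunshine coast', 'brisbane'),
--         ('delhi', 'delhi'), ('new delhi', 'delhi'), ('gurgaon', 'delhi'), ('noida', 'delhi'), ('ghaziabad', 'delhi'),
--         ('mumbai', 'mumbai'), ('navi mumbai', 'mumbai'), ('thane', 'mumbai'),
--     ]
--     hits_a = [m for s, m in suburb_metro if s in loc_a]
--     hits_b = [m for s, m in suburb_metro if s in loc_b]
--     return any(ma == mb for ma in hits_a for mb in hits_b)
-- ===== Notes on version B (the rewrite author's own statement) =====
-- stated objective: alternative
-- what changed: Replaces A's per-metro grouped loop (short-circuiting on the first metro where both locations match) by a flat inverted suburb->metro index: each location is resolved to its list of metro labels via the index, and the result is a pairwise join checking whether any two labels are equal.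
import Mathlib
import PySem

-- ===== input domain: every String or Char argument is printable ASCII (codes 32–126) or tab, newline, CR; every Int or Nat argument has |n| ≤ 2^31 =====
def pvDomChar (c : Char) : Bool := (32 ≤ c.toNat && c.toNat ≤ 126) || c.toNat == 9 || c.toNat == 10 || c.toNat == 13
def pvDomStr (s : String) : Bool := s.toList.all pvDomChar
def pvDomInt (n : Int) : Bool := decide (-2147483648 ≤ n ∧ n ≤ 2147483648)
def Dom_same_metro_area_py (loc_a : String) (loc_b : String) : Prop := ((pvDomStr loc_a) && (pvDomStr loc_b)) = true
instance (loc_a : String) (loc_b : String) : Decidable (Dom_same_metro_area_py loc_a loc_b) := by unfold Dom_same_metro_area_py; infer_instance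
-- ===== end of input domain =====

-- B replaces A's per-metro grouped loop by a flat inverted suburb->metro index with a
-- pairwise label-equality join; objective: alternative decomposition (no speed claim).

-- ===== PORT A =====
-- the dict literal of A (insertion order)
def pvMetroAreasA : List (String × List String) :=
  [("sydney", ["sydney", "parramatta", "bondi", "manly"]),
   ("melbourne", ["melbourne", "carlton", "richmond", "st kilda"]),
   ("brisbane", ["brisbane", "gold coast", "sunshine coast"]),
   ("delhi", ["delhi", "new delhi", "gurgaon", "noida", "ghaziabad"]),
   ("mumbai", ["mumbai", "navi mumbai", "thane"])]

-- the 'for metro, suburbs in metro_areas.items(): if … and …: return True' loop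
def pvLoopA : List (String × List String) → String → String → Bool
  | [], _, _ => false
  | (_, subs) :: rest, a, b =>
    if (subs.any fun s => PySem.Str.isIn s a) && (subs.any fun s => PySem.Str.isIn s b) then
      true
    else
      pvLoopA rest a b

def same_metro_area_py (loc_a : String) (loc_b : String) : Bool :=
  pvLoopA pvMetroAreasA loc_a loc_b

-- ===== PORT B =====
-- the flat inverted index literal of Source B: (suburb, metro)
def pvSuburbIndex : List (String × String) :=
  [("sydney", "sydney"), ("parramatta", "sydney"), ("bondi", "sydney"), ("manly", "sydney"),
   ("melbourne", "melbourne"), ("carlton", "melbourne"), ("richmond", "melbourne"), ("st kilda", "melbourne"),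
   ("brisbane", "brisbane"), ("gold coast", "brisbane"), ("sunshine coast", "brisbane"),
   ("delhi", "delhi"), ("new delhi", "delhi"), ("gurgaon", "delhi"), ("noida", "delhi"), ("ghaziabad", "delhi"),
   ("mumbai", "mumbai"), ("navi mumbai", "mumbai"), ("thane", "mumbai")]

def same_metro_area_py_alt (loc_a : String) (loc_b : String) : Bool :=
  -- hits_a = [m for s, m in suburb_metro if s in loc_a]  (and the same for loc_b)
  let hits_a := (pvSuburbIndex.filter fun p => PySem.Str.isIn p.1 loc_a).map Prod.snd
  let hits_b := (pvSuburbIndex.filter fun p => PySem.Str.isIn p.1 loc_b).map Prod.snd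
  -- any(ma == mb for ma in hits_a for mb in hits_b)
  hits_a.any fun ma => hits_b.any fun mb => ma == mb

-- ===== PRECONDITION & SPEC =====
def Spec_same_metro_area_py (loc_a : String) (loc_b : String) (out : Bool) : Prop := out = same_metro_area_py_alt loc_a loc_b
instance (loc_a : String) (loc_b : String) (out : Bool) : Decidable (Spec_same_metro_area_py loc_a loc_b out) := by unfold Spec_same_metro_area_py; infer_instance

-- ===== CLAIM (what is proved, stated in full; the proofs are below) =====
def Claim_equal_same_metro_area_py : Prop := ∀ (loc_a : String) (loc_b : String), Dom_same_metro_area_py loc_a loc_b → Spec_same_metro_area_py loc_a loc_b (same_metro_area_py loc_a loc_b)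

-- ===== LEMMAS AND PROOFS =====

-- characterisation of A's loop
theorem pvLoopA_eq_true (gs : List (String × List String)) (a b : String) :
    pvLoopA gs a b = true ↔
      ∃ g ∈ gs, (g.2.any fun s => PySem.Str.isIn s a) = true ∧
                (g.2.any fun s => PySem.Str.isIn s b) = true := by
  induction gs with
  | nil => simp [pvLoopA]
  | cons g rest ih =>
    obtain ⟨m, subs⟩ := g
    by_cases h : ((subs.any fun s => PySem.Str.isIn s a) && (subs.any fun s => PySem.Str.isIn s b)) = true
    · rw [Bool.and_eq_true] at h
      refine iff_of_true ?_ ⟨(m, subs), by simp, h.1, h.2⟩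
      simp only [pvLoopA]
      rw [if_pos (by rw [Bool.and_eq_true]; exact h)]
    · rw [Bool.and_eq_true] at h
      push Not at h
      simp only [pvLoopA]
      rw [if_neg (by rw [Bool.and_eq_true]; exact fun hc => h hc.1 hc.2), ih]
      constructor
      · rintro ⟨g', hg', ha, hb⟩; exact ⟨g', List.mem_cons_of_mem _ hg', ha, hb⟩
      · rintro ⟨g', hg', ha, hb⟩
        rcases List.mem_cons.mp hg' with rfl | hmem
        · exact absurd hb (h ha)
        · exact ⟨g', hmem, ha, hb⟩

-- the generic inverted index that the literal pvSuburbIndex is an instance of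
def pvMkIndex (gs : List (String × List String)) : List (String × String) :=
  gs.flatMap fun g => g.2.map fun s => (s, g.1)

theorem pvSuburbIndex_eq : pvSuburbIndex = pvMkIndex pvMetroAreasA := by rfl

theorem mem_pvMkIndex (gs : List (String × List String)) (p : String × String) :
    p ∈ pvMkIndex gs ↔ ∃ g ∈ gs, p.1 ∈ g.2 ∧ p.2 = g.1 := by
  simp only [pvMkIndex, List.mem_flatMap, List.mem_map]
  constructor
  · rintro ⟨g, hg, s, hs, rfl⟩; exact ⟨g, hg, hs, rfl⟩
  · rintro ⟨g, hg, hs, hm⟩; exact ⟨g, hg, p.1, hs, by rw [← hm]⟩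

-- distinct metro keys: a metro label determines its suburb list
theorem pvKeys_unique (gs : List (String × List String))
    (h : (gs.map Prod.fst).Nodup) {m : String} {s1 s2 : List String}
    (h1 : (m, s1) ∈ gs) (h2 : (m, s2) ∈ gs) : s1 = s2 := by
  induction gs with
  | nil => cases h1
  | cons g rest ih =>
    rw [List.map_cons, List.nodup_cons] at h
    rcases List.mem_cons.mp h1 with rfl | hm1 <;> rcases List.mem_cons.mp h2 with h2' | hm2
    · cases h2'; rfl
    · exact absurd (List.mem_map_of_mem (f := Prod.fst) hm2) (by simpa using h.1)
    · cases h2'; exact absurd (List.mem_map_of_mem (f := Prod.fst) hm1) (by simpa using h.1)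
    · exact ih h.2 hm1 hm2

theorem pvAlt_eq_true (a b : String) :
    same_metro_area_py_alt a b = true ↔
      ∃ p ∈ pvSuburbIndex, PySem.Str.isIn p.1 a = true ∧
        ∃ q ∈ pvSuburbIndex, PySem.Str.isIn q.1 b = true ∧ p.2 = q.2 := by
  simp only [same_metro_area_py_alt, List.any_eq_true, List.mem_map, List.mem_filter,
    beq_iff_eq]
  constructor
  · rintro ⟨ma, ⟨p, ⟨hp, hpa⟩, rfl⟩, mb, ⟨q, ⟨hq, hqb⟩, rfl⟩, hmm⟩
    exact ⟨p, hp, hpa, q, hq, hqb, hmm⟩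
  · rintro ⟨p, hp, hpa, q, hq, hqb, hmm⟩
    exact ⟨p.2, ⟨p, ⟨hp, hpa⟩, rfl⟩, q.2, ⟨q, ⟨hq, hqb⟩, rfl⟩, hmm⟩

theorem pvKeysNodup : (pvMetroAreasA.map Prod.fst).Nodup := by decide

-- ===== VERDICT (by name: the statement is the Claim_ definition above) =====
theorem same_metro_area_py_spec : Claim_equal_same_metro_area_py := by
  intro a b _
  unfold Spec_same_metro_area_py
  rw [Bool.eq_iff_iff]
  rw [same_metro_area_py, pvLoopA_eq_true, pvAlt_eq_true]
  constructor
  · rintro ⟨⟨m, subs⟩, hg, ha, hb⟩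
    rw [List.any_eq_true] at ha hb
    obtain ⟨sa, hsa, hsaIn⟩ := ha
    obtain ⟨sb, hsb, hsbIn⟩ := hb
    refine ⟨(sa, m), ?_, hsaIn, (sb, m), ?_, hsbIn, rfl⟩
    · rw [pvSuburbIndex_eq, mem_pvMkIndex]; exact ⟨(m, subs), hg, hsa, rfl⟩
    · rw [pvSuburbIndex_eq, mem_pvMkIndex]; exact ⟨(m, subs), hg, hsb, rfl⟩
  · rintro ⟨p, hp, hpa, q, hq, hqb, hmm⟩
    rw [pvSuburbIndex_eq, mem_pvMkIndex] at hp hq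
    obtain ⟨⟨m1, subs1⟩, hg1, hs1, hm1⟩ := hp
    obtain ⟨⟨m2, subs2⟩, hg2, hs2, hm2⟩ := hq
    have hmeq : m1 = m2 := by rw [hm1, hm2] at hmm; simpa using hmm
    subst hmeq
    have hsubs : subs1 = subs2 := pvKeys_unique pvMetroAreasA pvKeysNodup hg1 hg2
    subst hsubs
    exact ⟨(m1, subs1), hg1, List.any_eq_true.mpr ⟨p.1, hs1, hpa⟩,
      List.any_eq_true.mpr ⟨q.1, hs2, hqb⟩⟩
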